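-- pv_equiv track=rewrite | github.com/bobym/enspara | enspara/util/array.py | partition_indices
-- ===== SOURCE A (Python) =====
-- def partition_indices(indices, traj_lengths):
--     '''
--     Similar to _partition_list in function, this function uses
--     `traj_lengths` to determine which 2d trajectory-list index matches
--     the given 1d concatenated trajectory index for each index in
--     indices.
--     '''
--
--     partitioned_indices = []
--     for index in indices:
--         trj_index = 0
--         for traj_len in traj_lengths:
--             if traj_len > index:
--                 partitioned_indices.append((trj_index, index))
--                 break
--             else:
--                 index -= traj_len
--                 trj_index += 1
--
--     return partitioned_indices
-- ===== SOURCE B (Python) =====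
-- def partition_indices(indices, traj_lengths):
--     # One pass of prefix sums, then a single merged sweep: process the indices
--     # in increasing order and advance one pointer through the cumulative
--     # lengths, instead of rescanning traj_lengths for every index.
--     cums = []
--     total = 0
--     for traj_len in traj_lengths:
--         total += traj_len
--         cums.append(total)
--     n = len(cums)
--     res = [None] * len(indices)
--     t = 0
--     for i, x in sorted(enumerate(indices), key=lambda p: p[1]):
--         while t < n and cums[t] <= x:
--             t += 1
--         if t < n:
--             res[i] = (t, x - (cums[t - 1] if t else 0))
--     return [r for r in res if r is not None]
-- ===== Notes on version B (the rewrite author's own statement) =====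
-- stated objective: faster
-- what changed: B computes the cumulative trajectory lengths once, sorts the (position, index) pairs by index value and sweeps a single pointer through the cumulative lengths, instead of A's linear re-scan of traj_lengths for every index.
import Mathlib
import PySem

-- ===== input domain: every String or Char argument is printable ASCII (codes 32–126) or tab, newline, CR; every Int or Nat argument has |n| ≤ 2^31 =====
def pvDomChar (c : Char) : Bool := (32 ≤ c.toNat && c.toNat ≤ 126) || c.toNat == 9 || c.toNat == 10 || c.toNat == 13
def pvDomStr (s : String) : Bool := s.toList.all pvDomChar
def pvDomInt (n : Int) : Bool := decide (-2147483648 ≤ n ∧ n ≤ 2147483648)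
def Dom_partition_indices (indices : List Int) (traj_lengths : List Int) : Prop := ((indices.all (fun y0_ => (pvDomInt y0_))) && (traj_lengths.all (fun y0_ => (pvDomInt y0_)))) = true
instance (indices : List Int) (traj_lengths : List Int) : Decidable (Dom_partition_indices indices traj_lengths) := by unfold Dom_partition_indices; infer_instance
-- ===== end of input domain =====

-- B replaces A's per-index linear scan of traj_lengths by one prefix-sum pass,
-- a sort of the (position, value) pairs and a single merged pointer sweep
-- (a different algorithm; equal on every input).


-- ===== PORT A =====
-- inner 'for traj_len in traj_lengths' loop with its break/append
def pvInnerA (acc : List (Int × Int)) (index trj_index : Int) : List Int → List (Int × Int)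
  | [] => acc
  | l :: ls => if l > index then acc ++ [(trj_index, index)] else pvInnerA acc (index - l) (trj_index + 1) ls

def partition_indices (indices : List Int) (traj_lengths : List Int) : List (Int × Int) :=
  indices.foldl (fun acc index => pvInnerA acc index 0 traj_lengths) []

-- ===== PORT B =====
-- 'while t < n and cums[t] <= x: t += 1', run on fuel n - t (the loop only
-- moves t upward towards n, so n - t bounds the iteration count exactly)
def pvAdv (cums : List Int) (n : Nat) (x : Int) : Nat → Nat → Nat
  | 0, t => t
  | fuel + 1, t =>
      if t < n ∧ cums.getD t 0 ≤ x then pvAdv cums n x fuel (t + 1) else t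

-- 'for i, x in sorted(...)' body; i comes from enumerate so it is ≥ 0 and
-- 'res[i] = ...' is exactly List.set at i.toNat
def pvSweep (cums : List Int) (n : Nat) :
    List (Int × Int) → Nat → List (Option (Int × Int)) → List (Option (Int × Int))
  | [], _, res => res
  | (i, x) :: rest, t, res =>
      let t' := pvAdv cums n x (n - t) t
      if t' < n then
        pvSweep cums n rest t'
          (res.set i.toNat (some ((t' : Int), x - (if 0 < t' then cums.getD (t' - 1) 0 else 0))))
      else
        pvSweep cums n rest t' res

def partition_indices_alt (indices : List Int) (traj_lengths : List Int) : List (Int × Int) :=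
  let cums := (traj_lengths.foldl (fun st l => (st.1 + l, st.2 ++ [st.1 + l])) ((0 : Int), ([] : List Int))).2
  let n := cums.length
  let order := PySem.List.sorted (PySem.List.enumerate indices 0) (fun p => p.2) false
  let res := pvSweep cums n order 0 (List.replicate indices.length none)
  res.filterMap id

-- ===== PRECONDITION & SPEC =====
def Spec_partition_indices (indices : List Int) (traj_lengths : List Int) (out : List (Int × Int)) : Prop := out = partition_indices_alt indices traj_lengths
instance (indices : List Int) (traj_lengths : List Int) (out : List (Int × Int)) : Decidable (Spec_partition_indices indices traj_lengths out) := by unfold Spec_partition_indices; infer_instance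

-- ===== CLAIM (what is proved, stated in full; the proofs are below) =====
def Claim_equal_partition_indices : Prop := ∀ (indices : List Int) (traj_lengths : List Int), Dom_partition_indices indices traj_lengths → Spec_partition_indices indices traj_lengths (partition_indices indices traj_lengths)

-- ===== LEMMAS AND PROOFS =====

/-- cumulative sums of `lens` starting from running total `t` (spec form). -/
def pvCums : List Int → Int → List Int
  | [], _ => []
  | l :: ls, t => (t + l) :: pvCums ls (t + l)

lemma pvCums_length (lens : List Int) : ∀ t, (pvCums lens t).length = lens.length := by
  induction lens with
  | nil => intro t; rfl
  | cons l ls ih => intro t; simp [pvCums, ih]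

lemma pvCumFold (lens : List Int) : ∀ (t : Int) (C : List Int),
    lens.foldl (fun st l => (st.1 + l, st.2 ++ [st.1 + l])) (t, C)
      = (t + lens.sum, C ++ pvCums lens t) := by
  induction lens with
  | nil => intro t C; simp [pvCums]
  | cons l ls ih =>
      intro t C
      simp only [List.foldl]
      rw [ih (t + l) (C ++ [t + l])]
      simp [pvCums, List.append_assoc, List.sum_cons]
      omega

/-- first index whose value exceeds x (or the length if none). -/
def pvIsFirstGT (cum : List Int) (x : Int) (r : Nat) : Prop :=
  r ≤ cum.length ∧ (∀ i, i < r → cum.getD i 0 ≤ x) ∧ (r < cum.length → x < cum.getD r 0)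

lemma pvFirstGT_uniq {cum : List Int} {x : Int} {r₁ r₂ : Nat}
    (h₁ : pvIsFirstGT cum x r₁) (h₂ : pvIsFirstGT cum x r₂) : r₁ = r₂ := by
  rcases Nat.lt_trichotomy r₁ r₂ with h | h | h
  · have hx := h₁.2.2 (lt_of_lt_of_le h h₂.1)
    have := h₂.2.1 r₁ h
    omega
  · exact h
  · have hx := h₂.2.2 (lt_of_lt_of_le h h₁.1)
    have := h₁.2.1 r₂ h
    omega

/-- structural form of the first-exceeding position. -/
def pvFirst : List Int → Int → Nat
  | [], _ => 0
  | c :: cs, x => if x < c then 0 else pvFirst cs x + 1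

lemma pvFirst_spec (cums : List Int) (x : Int) : pvIsFirstGT cums x (pvFirst cums x) := by
  induction cums with
  | nil => exact ⟨by simp [pvFirst], fun i hi => by simp [pvFirst] at hi, by simp⟩
  | cons c cs ih =>
      by_cases h : x < c
      · refine ⟨by simp [pvFirst, h], fun i hi => by simp [pvFirst, h] at hi, fun _ => ?_⟩
        simp [pvFirst, h]
      · obtain ⟨h1, h2, h3⟩ := ih
        refine ⟨by simp [pvFirst, h]; omega, fun i hi => ?_, fun hr => ?_⟩
        · simp only [pvFirst, if_neg h] at hi
          cases i with
          | zero => simpa using le_of_not_gt h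
          | succ j => simpa using h2 j (by omega)
        · simp only [pvFirst, if_neg h] at hr ⊢
          simp only [List.length_cons] at hr
          simpa using h3 (by omega)

/-- per-value result of both programs, phrased over the cumulative sums. -/
def pvOptC (cums : List Int) (x : Int) : Option (Int × Int) :=
  let r := pvFirst cums x
  if r < cums.length then
    some ((r : Int), x - (if 0 < r then cums.getD (r - 1) 0 else 0))
  else none

/-- option-valued reformulation of A's inner loop (index offset, no accumulator). -/
def pvF (x : Int) : List Int → Option (Nat × Int)
  | [] => none
  | l :: ls => if l > x then some (0, x) else (pvF (x - l) ls).map (fun p => (p.1 + 1, p.2))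

lemma pvInnerA_char (lens : List Int) : ∀ (x t : Int) (acc : List (Int × Int)),
    pvInnerA acc x t lens = acc ++ (match pvF x lens with
      | some p => [((t + (p.1 : Int)), p.2)]
      | none => []) := by
  induction lens with
  | nil => intro x t acc; simp [pvInnerA, pvF]
  | cons l ls ih =>
      intro x t acc
      simp only [pvInnerA, pvF]
      by_cases h : l > x
      · simp [h]
      · simp only [if_neg h]
        rw [ih (x - l) (t + 1) acc]
        cases hF : pvF (x - l) ls with
        | none => simp
        | some p =>
            simp only [Option.map_some]
            congr 2
            push_cast
            ring

lemma pvCums_shift (lens : List Int) : ∀ (a b : Int),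
    pvCums lens (a + b) = (pvCums lens b).map (· + a) := by
  induction lens with
  | nil => intro a b; rfl
  | cons l ls ih =>
      intro a b
      have h1 : a + b + l = a + (b + l) := by omega
      rw [pvCums, pvCums, List.map_cons, h1, ih a (b + l)]
      simp only [List.cons.injEq]
      exact ⟨by omega, trivial⟩

lemma getD_map_add (cs : List Int) (l : Int) (j : Nat) (hj : j < cs.length) :
    (cs.map (· + l)).getD j 0 = cs.getD j 0 + l := by
  rw [List.getD_eq_getElem _ _ (by simpa using hj), List.getD_eq_getElem _ _ hj]
  simp

lemma pvF_char (lens : List Int) : ∀ x : Int,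
    (match pvF x lens with
      | some p => p.1 < lens.length ∧ pvIsFirstGT (pvCums lens 0) x p.1 ∧
          p.2 = x - (if 0 < p.1 then (pvCums lens 0).getD (p.1 - 1) 0 else 0)
      | none => pvIsFirstGT (pvCums lens 0) x lens.length) := by
  induction lens with
  | nil =>
      intro x
      simp [pvF, pvIsFirstGT, pvCums]
  | cons l ls ih =>
      intro x
      have hmap : pvCums ls (0 + l) = (pvCums ls 0).map (· + l) := by
        rw [show (0 : Int) + l = l + 0 by omega, pvCums_shift]
      have hlen : (pvCums ls 0).length = ls.length := pvCums_length ls 0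
      simp only [pvF]
      by_cases h : l > x
      · simp only [if_pos h]
        refine ⟨by simp, ⟨by simp [pvCums_length], fun i hi => absurd hi (by omega), fun _ => ?_⟩, by simp⟩
        simp [pvCums]
        omega
      · have hle : l ≤ x := by omega
        simp only [if_neg h]
        have ihx := ih (x - l)
        cases hF : pvF (x - l) ls with
        | none =>
            rw [hF] at ihx
            obtain ⟨_, hall, _⟩ := ihx
            simp only [Option.map_none]
            refine ⟨by simp [pvCums_length], fun i hi => ?_, fun hc => ?_⟩
            · simp only [pvCums]
              cases i with
              | zero => simpa using hle
              | succ j =>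
                  have hj : j < ls.length := by
                    simp only [List.length_cons] at hi; omega
                  simp only [List.getD_cons_succ, hmap]
                  have hg := getD_map_add (pvCums ls 0) l j (by omega)
                  have h2 := hall j hj
                  omega
            · rw [pvCums_length] at hc
              simp only [List.length_cons] at hc
              omega
        | some p =>
            rw [hF] at ihx
            obtain ⟨hk, ⟨_, hall, hgt⟩, hr⟩ := ihx
            simp only [Option.map_some]
            refine ⟨by simp only [List.length_cons]; omega,
              ⟨by rw [pvCums_length]; simp only [List.length_cons]; omega,
               fun i hi => ?_, fun hc => ?_⟩, ?_⟩
            · simp only [pvCums]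
              cases i with
              | zero => simpa using hle
              | succ j =>
                  simp only [List.getD_cons_succ, hmap]
                  have hg := getD_map_add (pvCums ls 0) l j (by omega)
                  have h2 := hall j (by omega)
                  omega
            · simp only [pvCums, List.getD_cons_succ, hmap]
              have hg := getD_map_add (pvCums ls 0) l p.1 (by omega)
              have h2 := hgt (by omega)
              omega
            · rw [if_pos (by omega)]
              simp only [Nat.add_sub_cancel]
              cases hp : p.1 with
              | zero =>
                  rw [hp] at hr
                  norm_num at hr
                  simp only [pvCums, List.getD_cons_zero]
                  omega
              | succ j =>
                  rw [hp] at hr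
                  rw [if_pos (by omega)] at hr
                  simp only [Nat.add_sub_cancel] at hr
                  simp only [pvCums, List.getD_cons_succ, hmap]
                  have hg := getD_map_add (pvCums ls 0) l j (by omega)
                  omega

/-- A's per-index result is pvOptC over the cumulative sums. -/
lemma pvG_eq_optC (lens : List Int) (x : Int) :
    (match pvF x lens with
      | some p => [((p.1 : Int), p.2)]
      | none => ([] : List (Int × Int))) = (pvOptC (pvCums lens 0) x).toList := by
  have hc := pvF_char lens x
  have hlen := pvCums_length lens 0
  cases hF : pvF x lens with
  | none =>
      rw [hF] at hc
      have hc2 : pvIsFirstGT (pvCums lens 0) x lens.length := hc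
      have : pvFirst (pvCums lens 0) x = lens.length :=
        pvFirstGT_uniq (pvFirst_spec (pvCums lens 0) x) hc2
      simp [pvOptC, this, hlen]
  | some p =>
      rw [hF] at hc
      obtain ⟨hk, hfirst, hr⟩ := (hc : _ ∧ _ ∧ _)
      have hfp : pvFirst (pvCums lens 0) x = p.1 :=
        pvFirstGT_uniq (pvFirst_spec (pvCums lens 0) x) hfirst
      simp [pvOptC, hfp, hlen, hk, hr]

lemma pvFold_append_toList (f : Int → Option (Int × Int)) (l : List Int) :
    ∀ acc, l.foldl (fun a x => a ++ (f x).toList) acc = acc ++ l.filterMap f := by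
  induction l with
  | nil => intro acc; simp
  | cons x xs ih =>
      intro acc
      simp only [List.foldl, List.filterMap_cons]
      cases f x with
      | none => simpa using ih acc
      | some v => rw [ih]; simp

/-- A equals filterMap of pvOptC over the cumulative sums. -/
lemma pvA_char (indices lens : List Int) :
    partition_indices indices lens = indices.filterMap (pvOptC (pvCums lens 0)) := by
  unfold partition_indices
  have hstep : (fun acc index => pvInnerA acc index 0 lens)
      = fun acc x => acc ++ (pvOptC (pvCums lens 0) x).toList := by
    funext acc x
    rw [pvInnerA_char lens x 0 acc, ← pvG_eq_optC lens x]
    cases pvF x lens with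
    | none => rfl
    | some p => simp
  rw [hstep, pvFold_append_toList]
  simp

/-- the while loop lands on the first-exceeding position. -/
lemma pvAdv_first (cums : List Int) (n : Nat) (x : Int) (hn : n = cums.length) :
    ∀ fuel t, t ≤ n → n - t ≤ fuel → (∀ s, s < t → cums.getD s 0 ≤ x) →
      pvIsFirstGT cums x (pvAdv cums n x fuel t) := by
  intro fuel
  induction fuel with
  | zero =>
      intro t h1 h2 h3
      have ht : t = n := by omega
      subst ht
      simp only [pvAdv]
      exact ⟨by omega, h3, fun hc => absurd hc (by omega)⟩
  | succ m ih =>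
      intro t h1 h2 h3
      simp only [pvAdv]
      by_cases hc : t < n ∧ cums.getD t 0 ≤ x
      · rw [if_pos hc]
        refine ih (t + 1) (by omega) (by omega) (fun s hs => ?_)
        rcases Nat.lt_succ_iff_lt_or_eq.mp hs with h | h
        · exact h3 s h
        · subst h; exact hc.2
      · rw [if_neg hc]
        refine ⟨by omega, h3, fun hlt => ?_⟩
        rw [← hn] at hlt
        have : ¬ cums.getD t 0 ≤ x := fun hle => hc ⟨hlt, hle⟩
        omega

lemma pvSweep_length (cums : List Int) (n : Nat) :
    ∀ (order : List (Int × Int)) t res, (pvSweep cums n order t res).length = res.length := by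
  intro order
  induction order with
  | nil => intro t res; rfl
  | cons p rest ih =>
      intro t res
      obtain ⟨i, x⟩ := p
      simp only [pvSweep]
      split
      · rw [ih]; simp
      · rw [ih]

/-- positions not named in the order list are left untouched. -/
lemma pvSweep_getD_not_mem (cums : List Int) (n : Nat) :
    ∀ (order : List (Int × Int)) t res (j : Nat),
      (∀ p ∈ order, p.1.toNat ≠ j) →
      (pvSweep cums n order t res).getD j none = res.getD j none := by
  intro order
  induction order with
  | nil => intro t res j _; rfl
  | cons p rest ih =>
      intro t res j hj
      obtain ⟨i, x⟩ := p
      simp only [pvSweep]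
      have hne : i.toNat ≠ j := hj (i, x) (List.mem_cons_self)
      split
      · rw [ih _ _ _ (fun q hq => hj q (List.mem_cons_of_mem _ hq))]
        rcases Nat.lt_or_ge j res.length with hlt | hge
        · rw [List.getD_eq_getElem _ _ (by simpa using hlt), List.getD_eq_getElem _ _ hlt]
          rw [List.getElem_set_ne (by omega)]
        · rw [List.getD_eq_default _ _ (by simpa using hge), List.getD_eq_default _ _ hge]
      · exact ih _ _ _ (fun q hq => hj q (List.mem_cons_of_mem _ hq))

/-- main sweep invariant: every listed position receives pvOptC of its value. -/
lemma pvSweep_getD_mem (cums : List Int) (n : Nat) (hn : n = cums.length) :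
    ∀ (order : List (Int × Int)) t res,
      order.Pairwise (fun a b => a.2 ≤ b.2) →
      (order.map (·.1)).Nodup →
      (∀ p ∈ order, 0 ≤ p.1 ∧ p.1.toNat < res.length) →
      (∀ p ∈ order, res.getD p.1.toNat none = none) →
      t ≤ n →
      (∀ p ∈ order, ∀ s, s < t → cums.getD s 0 ≤ p.2) →
      ∀ p ∈ order, (pvSweep cums n order t res).getD p.1.toNat none = pvOptC cums p.2 := by
  intro order
  induction order with
  | nil => intro t res _ _ _ _ _ _ p hp; exact absurd hp (by simp)
  | cons q rest ih =>
      intro t res hpair hnd hbounds hnone ht hinv p hp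
      obtain ⟨i, x⟩ := q
      have hadv := pvAdv_first cums n x hn (n - t) t ht (le_refl _)
        (fun s hs => hinv (i, x) List.mem_cons_self s hs)
      set t' := pvAdv cums n x (n - t) t with ht'
      have hfirst : pvFirst cums x = t' := pvFirstGT_uniq (pvFirst_spec cums x) hadv
      have ht'le : t' ≤ n := by rw [hn]; exact hadv.1
      have hrestpair : rest.Pairwise (fun a b => a.2 ≤ b.2) := hpair.of_cons
      have hxle : ∀ p ∈ rest, x ≤ p.2 := fun p hp => List.rel_of_pairwise_cons hpair hp
      have hrestinv : ∀ p ∈ rest, ∀ s, s < t' → cums.getD s 0 ≤ p.2 := by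
        intro p hp s hs
        exact le_trans (hadv.2.1 s hs) (hxle p hp)
      have hnd' : (∀ y : Int, (i, y) ∉ rest) ∧ (rest.map (·.1)).Nodup := by
        simpa using hnd
      have hndrest : (rest.map (·.1)).Nodup := hnd'.2
      have hinotin : ∀ p ∈ rest, p.1.toNat ≠ i.toNat := by
        rintro ⟨p1, p2⟩ hp he
        have h0i : 0 ≤ i := (hbounds (i, x) List.mem_cons_self).1
        have h0p : 0 ≤ p1 := (hbounds (p1, p2) (List.mem_cons_of_mem _ hp)).1
        have hpi : p1 = i := by simp at he; omega
        exact hnd'.1 p2 (hpi ▸ hp)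
      simp only [pvSweep]
      rcases List.mem_cons.mp hp with he | hrest
      · -- p is the head: its slot ends up holding pvOptC cums x
        subst he
        by_cases hlt : t' < n
        · rw [if_pos hlt]
          rw [pvSweep_getD_not_mem cums n rest _ _ _ hinotin]
          have hilen : i.toNat < res.length := (hbounds (i, x) List.mem_cons_self).2
          rw [List.getD_eq_getElem _ _ (by simpa using hilen)]
          rw [List.getElem_set_self (h := by simpa using hilen)]
          have hlen' : t' < cums.length := by omega
          simp [pvOptC, hfirst, ht']
          rwa [← ht']
        · rw [if_neg hlt]
          rw [pvSweep_getD_not_mem cums n rest _ _ _ hinotin]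
          rw [hnone (i, x) List.mem_cons_self]
          have hlen' : ¬ t' < cums.length := by omega
          simp [pvOptC, hfirst, hlen']
      · -- p is in the tail: apply the induction hypothesis
        by_cases hlt : t' < n
        · rw [if_pos hlt]
          refine ih t' _ hrestpair hndrest ?_ ?_ ht'le hrestinv p hrest
          · intro q hq
            have := hbounds q (List.mem_cons_of_mem _ hq)
            simpa using this
          · intro q hq
            have hne := hinotin q hq
            have hqlen : q.1.toNat < res.length := (hbounds q (List.mem_cons_of_mem _ hq)).2
            rw [List.getD_eq_getElem _ _ (by simpa using hqlen)]
            rw [List.getElem_set_ne (by omega)]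
            rw [← List.getD_eq_getElem _ _ hqlen]
            exact hnone q (List.mem_cons_of_mem _ hq)
        · rw [if_neg hlt]
          exact ih t' _ hrestpair hndrest
            (fun q hq => hbounds q (List.mem_cons_of_mem _ hq))
            (fun q hq => hnone q (List.mem_cons_of_mem _ hq)) ht'le hrestinv p hrest

-- ===== VERDICT (by name: the statement is the Claim_ definition above) =====
theorem partition_indices_spec : Claim_equal_partition_indices := by
  intro indices lens _hdom
  unfold Spec_partition_indices
  rw [pvA_char]
  unfold partition_indices_alt
  rw [pvCumFold lens 0 []]
  simp only [List.nil_append]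
  set cums := pvCums lens 0 with hcums
  set order := PySem.List.sorted (PySem.List.enumerate indices 0) (fun p => p.2) false with horder
  have hperm : order.Perm (PySem.List.enumerate indices 0) := PySem.List.sorted_perm _ _ _
  have hpair : order.Pairwise (fun a b => a.2 ≤ b.2) := PySem.List.sorted_pairwise _ _
  have hnd : (order.map (·.1)).Nodup := by
    have h1 : (order.map (·.1)).Perm ((PySem.List.enumerate indices 0).map (·.1)) := hperm.map _
    refine h1.nodup_iff.mpr ?_
    have hpw : ((PySem.List.enumerate indices 0).map (·.1)).Pairwise (· < ·) :=
      List.pairwise_map.mpr (PySem.List.pairwise_lt_enumerate (xs := indices) (s := 0))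
    exact hpw.nodup
  have hmem : ∀ p, p ∈ order ↔ p ∈ PySem.List.enumerate indices 0 := fun p => hperm.mem_iff
  have hbounds : ∀ p ∈ order, 0 ≤ p.1 ∧ p.1.toNat < (List.replicate indices.length (none : Option (Int × Int))).length := by
    intro p hp
    obtain ⟨k, hk, rfl⟩ := (PySem.List.mem_enumerate_iff _ _ _).mp ((hmem p).mp hp)
    simp
    omega
  have hnone : ∀ p ∈ order, (List.replicate indices.length (none : Option (Int × Int))).getD p.1.toNat none = none := by
    intro p hp
    rcases Nat.lt_or_ge p.1.toNat indices.length with hlt | hge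
    · rw [List.getD_eq_getElem _ _ (by simpa using hlt)]
      simp
    · rw [List.getD_eq_default _ _ (by simpa using hge)]
  have hsweep := pvSweep_getD_mem cums cums.length rfl order 0
    (List.replicate indices.length none) hpair hnd hbounds hnone (by omega)
    (fun p _ s hs => absurd hs (by omega))
  set res := pvSweep cums cums.length order 0 (List.replicate indices.length none) with hres
  have hlen : res.length = indices.length := by
    rw [hres, pvSweep_length]; simp
  have hresj : ∀ j (hj : j < indices.length), res.getD j none = pvOptC cums indices[j] := by
    intro j hj
    have hpin : ((j : Int), indices[j]) ∈ order := by
      rw [hmem]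
      exact (PySem.List.mem_enumerate_iff _ _ _).mpr ⟨j, hj, by simp⟩
    have := hsweep ((j : Int), indices[j]) hpin
    simpa using this
  have hresmap : res = indices.map (pvOptC cums) := by
    apply List.ext_getElem
    · simp [hlen]
    · intro j hj1 hj2
      have hj : j < indices.length := by simpa using hj2
      have := hresj j hj
      rw [List.getD_eq_getElem _ _ (by omega)] at this
      simpa using this
  rw [hresmap]
  rw [List.filterMap_map]
  rfl
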